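-- pv_equiv track=rewrite | github.com/PaixaoThales/Python | resulacao.py | arremesso
-- ===== SOURCE A (Python) =====
-- def arremesso(n: int, v: int) -> str:
--     """
--     -> verifica se um arremesso eh possivel realizar ou arremesso ou nao.
--     :parâmetro n: distancia do buraco
--     :parâmetro v: velocidade do arremesso
--     :return: retorna possivel, caso o arremesso seja possivel, ou impossivel caso nao seja
--     """
--     buraco = 0
--     quique = 0
--     while v != 0:
--         buraco += v
--         quique += 1
--         if buraco == n:
--             return 'possivel'
--         if quique == v:
--             v -= 1
--             quique = 0
--     return 'possivel' if buraco == n else 'impossivel'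
-- ===== SOURCE B (Python) =====
-- def arremesso(n: int, v: int) -> str:
--     # One pass over velocity blocks: with velocity k the reachable sums are
--     # base + j*k for j = 1..k, so test n - base by range + divisibility in O(1).
--     base = 0
--     for k in range(v, 0, -1):
--         m = n - base
--         if 0 < m <= k * k and m % k == 0:
--             return 'possivel'
--         base += k * k
--     return 'possivel' if n == base else 'impossivel'
-- ===== Notes on version B (the rewrite author's own statement) =====
-- stated objective: faster
-- what changed: Instead of simulating every bounce step (v + v-1 + ... additions of each velocity), B walks the v velocity blocks once and decides each block by an O(1) range-plus-divisibility test on n minus the block base.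
-- outside the precondition, e.g. on arremesso(-1, -1): A returns 'possivel', B returns 'impossivel'
import Mathlib
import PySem

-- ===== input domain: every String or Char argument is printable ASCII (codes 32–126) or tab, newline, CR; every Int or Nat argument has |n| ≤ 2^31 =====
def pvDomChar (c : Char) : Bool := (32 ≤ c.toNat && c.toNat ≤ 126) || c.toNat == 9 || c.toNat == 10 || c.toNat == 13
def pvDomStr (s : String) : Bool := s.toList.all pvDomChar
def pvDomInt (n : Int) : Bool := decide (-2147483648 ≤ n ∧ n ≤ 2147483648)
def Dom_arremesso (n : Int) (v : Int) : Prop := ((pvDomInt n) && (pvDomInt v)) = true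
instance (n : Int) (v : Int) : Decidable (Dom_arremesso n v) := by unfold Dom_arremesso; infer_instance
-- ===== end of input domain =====

-- B replaces A's step-by-step bounce simulation (O(v^2) additions) by one O(v) pass over the
-- velocity blocks with an O(1) divisibility/range check per block; return values agree on Pre_.

-- ===== PORT A =====
-- The inner run of A's while-loop at a fixed velocity v: `k` iterations of
-- `buraco += v; quique += 1; if buraco == n: return 'possivel'` (quique counts up to v, i.e. k = v
-- iterations, then velocity drops). `none` = early return 'possivel', `some b` = final buraco.
def arrInner (n buraco v : Int) (k : Nat) : Option Int :=
  match k with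
  | 0 => some buraco
  | Nat.succ k' =>
      let b := buraco + v
      if b = n then none else arrInner n b v k'

-- A's while-loop: while v != 0 run one velocity block, then v -= 1; final `buraco == n` check.
-- For v < 0 the Python loop never terminates; Pre_ excludes those inputs, and the port returns an
-- arbitrary fixed string there so that it is total (guard for totality only, no claim about it).
def arrOuter (n buraco v : Int) : String :=
  if v = 0 then (if buraco = n then "possivel" else "impossivel")
  else if v < 0 then "impossivel"
  else
    match arrInner n buraco v v.toNat with
    | none => "possivel"
    | some b => arrOuter n b (v - 1)
termination_by v.toNat
decreasing_by omega

def arremesso (n : Int) (v : Int) : String := arrOuter n 0 v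

-- ===== PORT B =====
-- Source B's loop `for k in range(v, 0, -1)` with accumulator base.
def altLoop (n base v : Int) : String :=
  if v ≤ 0 then (if n = base then "possivel" else "impossivel")
  else
    let m := n - base
    if 0 < m ∧ m ≤ v * v ∧ PySem.Int.mod m v = 0 then "possivel"
    else altLoop n (base + v * v) (v - 1)
termination_by v.toNat
decreasing_by omega

def arremesso_alt (n : Int) (v : Int) : String := altLoop n 0 v

-- ===== PRECONDITION & SPEC =====
-- Pre_ excludes negative velocities, where the bounce counter can never reach v so A's loop
-- never decrements v: there A diverges on almost every n and returns 'possivel' only on the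
-- accidental corner where n is hit as an exact multiple j*v of the undiminished velocity
-- (e.g. (-1, -1)); B naturally treats a negative velocity as an empty throw.
def Pre_arremesso (n : Int) (v : Int) : Prop := 0 ≤ v
instance (n : Int) (v : Int) : Decidable (Pre_arremesso n v) := by unfold Pre_arremesso; infer_instance
def pvWitness_arremesso : Int × Int := (6, 2)

def Spec_arremesso (n : Int) (v : Int) (out : String) : Prop := out = arremesso_alt n v
instance (n : Int) (v : Int) (out : String) : Decidable (Spec_arremesso n v out) := by unfold Spec_arremesso; infer_instance

-- ===== CLAIM (what is proved, stated in full; the proofs are below) =====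
def Claim_equal_arremesso : Prop := ∀ (n : Int) (v : Int), Dom_arremesso n v → Pre_arremesso n v → Spec_arremesso n v (arremesso n v)

-- ===== LEMMAS AND PROOFS =====

-- Characterisation of one inner block: early exit (none) iff some partial sum base + j*v
-- (1 ≤ j ≤ k) hits n; otherwise the block ends with buraco = base + k*v.
theorem arrInner_spec (n v : Int) : ∀ (k : Nat) (base : Int),
    (arrInner n base v k = none ↔ ∃ j : Nat, 1 ≤ j ∧ j ≤ k ∧ base + (j : Int) * v = n) ∧
    (arrInner n base v k = none ∨ arrInner n base v k = some (base + (k : Int) * v)) := by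
  intro k
  induction k with
  | zero =>
      intro base
      constructor
      · simp [arrInner]
      · right; simp [arrInner]
  | succ k' ih =>
      intro base
      rw [arrInner]
      by_cases hb : base + v = n
      · rw [if_pos hb]
        refine ⟨⟨fun _ => ⟨1, by omega, by omega, by push_cast; omega⟩, fun _ => rfl⟩, Or.inl rfl⟩
      · simp only [if_neg hb]
        obtain ⟨ihiff, ihdisj⟩ := ih (base + v)
        constructor
        · rw [ihiff]
          constructor
          · rintro ⟨j, h1, h2, h3⟩
            exact ⟨j + 1, by omega, by omega, by push_cast at h3 ⊢; linarith⟩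
          · rintro ⟨j, h1, h2, h3⟩
            rcases Nat.exists_eq_add_of_le h1 with ⟨j', rfl⟩
            rcases Nat.eq_zero_or_pos j' with rfl | hj'
            · exact absurd (by push_cast at h3; linarith) hb
            · exact ⟨j', by omega, by omega, by push_cast at h3 ⊢; linarith⟩
        · rcases ihdisj with h | h
          · exact Or.inl h
          · right; rw [h]; congr 1; push_cast; ring

-- B's O(1) block test matches "some partial sum of this velocity block hits n".
theorem block_test (n base v : Int) (hv : 0 < v) :
    (0 < n - base ∧ n - base ≤ v * v ∧ PySem.Int.mod (n - base) v = 0) ↔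
      ∃ j : Nat, 1 ≤ j ∧ j ≤ v.toNat ∧ base + (j : Int) * v = n := by
  constructor
  · rintro ⟨h1, h2, h3⟩
    obtain ⟨c, hc⟩ := (PySem.Int.mod_eq_zero_iff_dvd _ _).mp h3
    have hc1 : 1 ≤ c := by nlinarith
    have hcv : c ≤ v := by nlinarith
    refine ⟨c.toNat, by omega, by omega, ?_⟩
    have hcast : (c.toNat : Int) = c := by omega
    rw [hcast]
    linarith [hc]
  · rintro ⟨j, h1, h2, h3⟩
    have hj : (1 : Int) ≤ (j : Int) := by exact_mod_cast h1
    have hjv : (j : Int) ≤ v := by omega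
    refine ⟨by nlinarith, by nlinarith, ?_⟩
    exact (PySem.Int.mod_eq_zero_iff_dvd _ _).mpr ⟨(j : Int), by linarith⟩

-- Main invariant: from any common state (base, v) the two loops agree.
theorem outer_eq_alt (n : Int) : ∀ (k : Nat) (v : Int), 0 ≤ v → v.toNat = k →
    ∀ base : Int, arrOuter n base v = altLoop n base v := by
  intro k
  induction k with
  | zero =>
      intro v hnn hv base
      have h0 : v = 0 := by omega
      rw [arrOuter, altLoop, if_pos h0, if_pos (by omega : v ≤ 0)]
      by_cases h : base = n
      · simp [h]
      · rw [if_neg h, if_neg (fun hh => h hh.symm)]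
  | succ k' ih =>
      intro v hnn hv base
      have hpos : 0 < v := by omega
      have hcast : (v.toNat : Int) = v := by omega
      have hk : (v - 1).toNat = k' := by omega
      rw [arrOuter, altLoop, if_neg (by omega : ¬ v = 0), if_neg (by omega : ¬ v < 0), if_neg (by omega : ¬ v ≤ 0)]
      simp only
      obtain ⟨hiff, hdisj⟩ := arrInner_spec n v v.toNat base
      by_cases hex : ∃ j : Nat, 1 ≤ j ∧ j ≤ v.toNat ∧ base + (j : Int) * v = n
      · rw [hiff.mpr hex, if_pos ((block_test n base v hpos).mpr hex)]
      · have hnone : arrInner n base v v.toNat ≠ none := fun h => hex (hiff.mp h)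
        rcases hdisj with h | h
        · exact absurd h hnone
        · rw [h, if_neg (fun hc => hex ((block_test n base v hpos).mp hc))]
          rw [hcast]
          exact ih (v - 1) (by omega) hk (base + v * v)

-- ===== VERDICT (by name: the statement is the Claim_ definition above) =====
theorem arremesso_spec : Claim_equal_arremesso := by
  intro n v _ hpre
  unfold Spec_arremesso arremesso arremesso_alt
  exact outer_eq_alt n v.toNat v hpre rfl 0
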